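-- pv_equiv track=rewrite | github.com/jdburke155/survivor-engine | app.py | compute_day_conflicts
-- ===== SOURCE A (Python) =====
-- FIRST_ROUND = {
--     "R1_E_1v16":{"region":"East","seed_a":1,"team_a":"Duke","seed_b":16,"team_b":"Siena","spread":-27.5,"day":"Thu 3/19","time":"2:50 PM","loc":"Greenville, SC"},
--     "R1_E_8v9":{"region":"East","seed_a":8,"team_a":"Ohio State","seed_b":9,"team_b":"TCU","spread":-2.5,"day":"Thu 3/19","time":"12:15 PM","loc":"Greenville, SC"},
--     "R1_E_5v12":{"region":"East","seed_a":5,"team_a":"St. John's","seed_b":12,"team_b":"Northern Iowa","spread":-10.5,"day":"Fri 3/20","time":"7:10 PM","loc":"San Diego, CA"},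
--     "R1_E_4v13":{"region":"East","seed_a":4,"team_a":"Kansas","seed_b":13,"team_b":"Cal Baptist","spread":-13.5,"day":"Fri 3/20","time":"9:45 PM","loc":"San Diego, CA"},
--     "R1_E_6v11":{"region":"East","seed_a":6,"team_a":"Louisville","seed_b":11,"team_b":"South Florida","spread":-6.5,"day":"Thu 3/19","time":"1:30 PM","loc":"Buffalo, NY"},
--     "R1_E_3v14":{"region":"East","seed_a":3,"team_a":"Michigan State","seed_b":14,"team_b":"North Dakota State","spread":-16.5,"day":"Thu 3/19","time":"4:05 PM","loc":"Buffalo, NY"},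
--     "R1_E_7v10":{"region":"East","seed_a":7,"team_a":"UCLA","seed_b":10,"team_b":"UCF","spread":-6.5,"day":"Fri 3/20","time":"7:25 PM","loc":"Philadelphia, PA"},
--     "R1_E_2v15":{"region":"East","seed_a":2,"team_a":"UConn","seed_b":15,"team_b":"Furman","spread":-19.5,"day":"Fri 3/20","time":"10:00 PM","loc":"Philadelphia, PA"},
--     "R1_W_1v16":{"region":"West","seed_a":1,"team_a":"Arizona","seed_b":16,"team_b":"LIU","spread":-30.5,"day":"Fri 3/20","time":"1:35 PM","loc":"San Diego, CA"},
--     "R1_W_8v9":{"region":"West","seed_a":8,"team_a":"Villanova","seed_b":9,"team_b":"Utah State","spread":2.5,"day":"Fri 3/20","time":"4:10 PM","loc":"San Diego, CA"},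
--     "R1_W_5v12":{"region":"West","seed_a":5,"team_a":"Wisconsin","seed_b":12,"team_b":"High Point","spread":-11.5,"day":"Thu 3/19","time":"1:50 PM","loc":"Portland, OR"},
--     "R1_W_4v13":{"region":"West","seed_a":4,"team_a":"Arkansas","seed_b":13,"team_b":"Hawaii","spread":-15.5,"day":"Thu 3/19","time":"4:25 PM","loc":"Portland, OR"},
--     "R1_W_6v11":{"region":"West","seed_a":6,"team_a":"BYU","seed_b":11,"team_b":"Texas/NC State","spread":-5.0,"day":"Thu 3/19","time":"7:25 PM","loc":"Portland, OR"},
--     "R1_W_3v14":{"region":"West","seed_a":3,"team_a":"Gonzaga","seed_b":14,"team_b":"Kennesaw State","spread":-19.5,"day":"Thu 3/19","time":"10:00 PM","loc":"Portland, OR"},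
--     "R1_W_7v10":{"region":"West","seed_a":7,"team_a":"Miami FL","seed_b":10,"team_b":"Missouri","spread":-1.5,"day":"Fri 3/20","time":"10:10 PM","loc":"St. Louis, MO"},
--     "R1_W_2v15":{"region":"West","seed_a":2,"team_a":"Purdue","seed_b":15,"team_b":"Queens","spread":-22.5,"day":"Fri 3/20","time":"7:35 PM","loc":"St. Louis, MO"},
--     "R1_MW_1v16":{"region":"Midwest","seed_a":1,"team_a":"Michigan","seed_b":16,"team_b":"UMBC/Howard","spread":-28.0,"day":"Thu 3/19","time":"7:10 PM","loc":"Buffalo, NY"},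
--     "R1_MW_8v9":{"region":"Midwest","seed_a":8,"team_a":"Georgia","seed_b":9,"team_b":"Saint Louis","spread":-2.5,"day":"Thu 3/19","time":"9:45 PM","loc":"Buffalo, NY"},
--     "R1_MW_5v12":{"region":"Midwest","seed_a":5,"team_a":"Texas Tech","seed_b":12,"team_b":"Akron","spread":-8.5,"day":"Fri 3/20","time":"12:40 PM","loc":"Tampa, FL"},
--     "R1_MW_4v13":{"region":"Midwest","seed_a":4,"team_a":"Alabama","seed_b":13,"team_b":"Hofstra","spread":-12.5,"day":"Fri 3/20","time":"3:15 PM","loc":"Tampa, FL"},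
--     "R1_MW_6v11":{"region":"Midwest","seed_a":6,"team_a":"Tennessee","seed_b":11,"team_b":"SMU/Miami OH","spread":-6.0,"day":"Fri 3/20","time":"4:25 PM","loc":"Philadelphia, PA"},
--     "R1_MW_3v14":{"region":"Midwest","seed_a":3,"team_a":"Virginia","seed_b":14,"team_b":"Wright State","spread":-17.5,"day":"Fri 3/20","time":"1:50 PM","loc":"Philadelphia, PA"},
--     "R1_MW_7v10":{"region":"Midwest","seed_a":7,"team_a":"Kentucky","seed_b":10,"team_b":"Santa Clara","spread":-3.5,"day":"Fri 3/20","time":"12:15 PM","loc":"St. Louis, MO"},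
--     "R1_MW_2v15":{"region":"Midwest","seed_a":2,"team_a":"Iowa State","seed_b":15,"team_b":"Tennessee State","spread":-24.5,"day":"Fri 3/20","time":"2:50 PM","loc":"St. Louis, MO"},
--     "R1_S_1v16":{"region":"South","seed_a":1,"team_a":"Florida","seed_b":16,"team_b":"Lehigh/PV A&M","spread":-28.0,"day":"Fri 3/20","time":"9:25 PM","loc":"Tampa, FL"},
--     "R1_S_8v9":{"region":"South","seed_a":8,"team_a":"Clemson","seed_b":9,"team_b":"Iowa","spread":1.5,"day":"Fri 3/20","time":"6:50 PM","loc":"Tampa, FL"},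
--     "R1_S_5v12":{"region":"South","seed_a":5,"team_a":"Vanderbilt","seed_b":12,"team_b":"McNeese","spread":-11.5,"day":"Thu 3/19","time":"3:15 PM","loc":"Oklahoma City, OK"},
--     "R1_S_4v13":{"region":"South","seed_a":4,"team_a":"Nebraska","seed_b":13,"team_b":"Troy","spread":-13.5,"day":"Thu 3/19","time":"12:40 PM","loc":"Oklahoma City, OK"},
--     "R1_S_6v11":{"region":"South","seed_a":6,"team_a":"North Carolina","seed_b":11,"team_b":"VCU","spread":-2.5,"day":"Thu 3/19","time":"6:50 PM","loc":"Greenville, SC"},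
--     "R1_S_3v14":{"region":"South","seed_a":3,"team_a":"Illinois","seed_b":14,"team_b":"Penn","spread":-22.5,"day":"Thu 3/19","time":"9:25 PM","loc":"Greenville, SC"},
--     "R1_S_7v10":{"region":"South","seed_a":7,"team_a":"Saint Mary's","seed_b":10,"team_b":"Texas A&M","spread":-2.5,"day":"Thu 3/19","time":"7:35 PM","loc":"Oklahoma City, OK"},
--     "R1_S_2v15":{"region":"South","seed_a":2,"team_a":"Houston","seed_b":15,"team_b":"Idaho","spread":-21.5,"day":"Thu 3/19","time":"10:10 PM","loc":"Oklahoma City, OK"},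
-- }
--
-- REGION_DAY_S16 = {"East":"Fri 3/27","West":"Thu 3/26","Midwest":"Fri 3/27","South":"Thu 3/26"}
--
-- REGION_DAY_E8 = {"East":"Sun 3/29","West":"Sat 3/28","Midwest":"Sun 3/29","South":"Sat 3/28"}
--
-- def get_team_schedule(team):
--     """Get the day a team plays in each round (based on R64 day and region)."""
--     region = get_team_region(team)
--     r64_day = None
--     for g in FIRST_ROUND.values():
--         if g["team_a"] == team or g["team_b"] == team:
--             r64_day = g["day"]; break
--     if not region or not r64_day: return {}
--     # R32 day follows R64 day: Thu→Sat, Fri→Sun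
--     r32_day = "Sat 3/21" if r64_day == "Thu 3/19" else "Sun 3/22"
--     return {
--         "R64": r64_day, "R32": r32_day,
--         "S16": REGION_DAY_S16.get(region),
--         "E8": REGION_DAY_E8.get(region),
--         "FF": "Sat 4/4", "CHAMP": "Mon 4/6",
--     }
--
-- def compute_day_conflicts(team, used_teams):
--     """
--     Check if picking this team creates day conflicts in future rounds.
--     Returns dict with warnings for any round where used picks pile up on the same day.
--     """
--     team_sched = get_team_schedule(team)
--     if not team_sched: return {}
--
--     # Build schedule of already-used teams
--     used_by_day = {}  # round -> day -> count of used teams on that day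
--     for ut in used_teams:
--         ut_sched = get_team_schedule(ut)
--         for rnd, day in ut_sched.items():
--             if day:
--                 key = f"{rnd}|{day}"
--                 used_by_day[key] = used_by_day.get(key, 0) + 1
--
--     conflicts = {}
--     for rnd, day in team_sched.items():
--         if not day: continue
--         key = f"{rnd}|{day}"
--         existing = used_by_day.get(key, 0)
--         if existing >= 1 and rnd in ["E8", "FF"]:
--             conflicts[rnd] = f"Already have {existing} pick(s) on {day} for {rnd}"
--     return conflicts
--
-- def get_team_region(team):
--     """Look up region for a team."""
--     for g in FIRST_ROUND.values():
--         if g["team_a"] == team: return g["region"]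
--         if g["team_b"] == team: return g["region"]
--     return None
-- ===== SOURCE B (Python) =====
-- # B: flat team -> Elite-Eight-day table; one pass over used_teams with two counters
-- # (every known team plays the Final Four on Sat 4/4, so FF conflicts = count of known used teams).
--
-- _E8_SUN = "Sun 3/29"   # East & Midwest regions
-- _E8_SAT = "Sat 3/28"   # West & South regions
--
-- TEAM_E8_DAY = {
--     "Duke": _E8_SUN, "Siena": _E8_SUN, "Ohio State": _E8_SUN, "TCU": _E8_SUN,
--     "St. John's": _E8_SUN, "Northern Iowa": _E8_SUN, "Kansas": _E8_SUN, "Cal Baptist": _E8_SUN,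
--     "Louisville": _E8_SUN, "South Florida": _E8_SUN, "Michigan State": _E8_SUN, "North Dakota State": _E8_SUN,
--     "UCLA": _E8_SUN, "UCF": _E8_SUN, "UConn": _E8_SUN, "Furman": _E8_SUN,
--     "Arizona": _E8_SAT, "LIU": _E8_SAT, "Villanova": _E8_SAT, "Utah State": _E8_SAT,
--     "Wisconsin": _E8_SAT, "High Point": _E8_SAT, "Arkansas": _E8_SAT, "Hawaii": _E8_SAT,
--     "BYU": _E8_SAT, "Texas/NC State": _E8_SAT, "Gonzaga": _E8_SAT, "Kennesaw State": _E8_SAT,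
--     "Miami FL": _E8_SAT, "Missouri": _E8_SAT, "Purdue": _E8_SAT, "Queens": _E8_SAT,
--     "Michigan": _E8_SUN, "UMBC/Howard": _E8_SUN, "Georgia": _E8_SUN, "Saint Louis": _E8_SUN,
--     "Texas Tech": _E8_SUN, "Akron": _E8_SUN, "Alabama": _E8_SUN, "Hofstra": _E8_SUN,
--     "Tennessee": _E8_SUN, "SMU/Miami OH": _E8_SUN, "Virginia": _E8_SUN, "Wright State": _E8_SUN,
--     "Kentucky": _E8_SUN, "Santa Clara": _E8_SUN, "Iowa State": _E8_SUN, "Tennessee State": _E8_SUN,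
--     "Florida": _E8_SAT, "Lehigh/PV A&M": _E8_SAT, "Clemson": _E8_SAT, "Iowa": _E8_SAT,
--     "Vanderbilt": _E8_SAT, "McNeese": _E8_SAT, "Nebraska": _E8_SAT, "Troy": _E8_SAT,
--     "North Carolina": _E8_SAT, "VCU": _E8_SAT, "Illinois": _E8_SAT, "Penn": _E8_SAT,
--     "Saint Mary's": _E8_SAT, "Texas A&M": _E8_SAT, "Houston": _E8_SAT, "Idaho": _E8_SAT,
-- }
--
--
-- def compute_day_conflicts(team, used_teams):
--     my_e8 = TEAM_E8_DAY.get(team)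
--     if my_e8 is None:
--         return {}
--     ff = e8 = 0
--     for ut in used_teams:
--         d = TEAM_E8_DAY.get(ut)
--         if d is not None:
--             ff += 1
--             if d == my_e8:
--                 e8 += 1
--     conflicts = {}
--     if e8:
--         conflicts["E8"] = f"Already have {e8} pick(s) on {my_e8} for E8"
--     if ff:
--         conflicts["FF"] = f"Already have {ff} pick(s) on Sat 4/4 for FF"
--     return conflicts
-- ===== Notes on version B (the rewrite author's own statement) =====
-- stated objective: simpler
-- what changed: B replaces A's per-team 6-round schedule construction and global round|day count table by a flat team->Elite-Eight-day dict and one pass over used_teams with two counters (E8-same-day and known-team counts), exploiting that only the E8 and FF rounds can conflict and every known team plays FF on Sat 4/4.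
import Mathlib
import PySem

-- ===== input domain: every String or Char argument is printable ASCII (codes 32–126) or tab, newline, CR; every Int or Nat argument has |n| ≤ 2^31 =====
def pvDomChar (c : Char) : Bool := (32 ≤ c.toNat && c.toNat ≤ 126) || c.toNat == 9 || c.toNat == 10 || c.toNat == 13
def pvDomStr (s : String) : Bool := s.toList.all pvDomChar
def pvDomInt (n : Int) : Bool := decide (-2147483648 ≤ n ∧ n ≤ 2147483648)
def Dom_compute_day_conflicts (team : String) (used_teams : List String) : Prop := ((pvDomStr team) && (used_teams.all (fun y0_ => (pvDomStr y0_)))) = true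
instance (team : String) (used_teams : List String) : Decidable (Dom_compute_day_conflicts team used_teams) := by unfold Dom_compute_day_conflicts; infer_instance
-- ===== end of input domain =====

-- B replaces A's per-team 6-round schedule and global round|day count table by a flat
-- team -> Elite-Eight-day dict and one pass over used_teams with two counters; objective: simpler.

-- ===== PORT A =====
-- Only the four fields of a FIRST_ROUND game that compute_day_conflicts reads are kept
-- (seeds/spread/time/loc are never used; spread is a float and does not influence the result).
structure PVGame where
  region : String
  team_a : String
  team_b : String
  day : String
deriving Repr, DecidableEq

def FIRST_ROUND : List (String × PVGame) := [
  ("R1_E_1v16", ⟨"East", "Duke", "Siena", "Thu 3/19"⟩),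
  ("R1_E_8v9", ⟨"East", "Ohio State", "TCU", "Thu 3/19"⟩),
  ("R1_E_5v12", ⟨"East", "St. John's", "Northern Iowa", "Fri 3/20"⟩),
  ("R1_E_4v13", ⟨"East", "Kansas", "Cal Baptist", "Fri 3/20"⟩),
  ("R1_E_6v11", ⟨"East", "Louisville", "South Florida", "Thu 3/19"⟩),
  ("R1_E_3v14", ⟨"East", "Michigan State", "North Dakota State", "Thu 3/19"⟩),
  ("R1_E_7v10", ⟨"East", "UCLA", "UCF", "Fri 3/20"⟩),
  ("R1_E_2v15", ⟨"East", "UConn", "Furman", "Fri 3/20"⟩),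
  ("R1_W_1v16", ⟨"West", "Arizona", "LIU", "Fri 3/20"⟩),
  ("R1_W_8v9", ⟨"West", "Villanova", "Utah State", "Fri 3/20"⟩),
  ("R1_W_5v12", ⟨"West", "Wisconsin", "High Point", "Thu 3/19"⟩),
  ("R1_W_4v13", ⟨"West", "Arkansas", "Hawaii", "Thu 3/19"⟩),
  ("R1_W_6v11", ⟨"West", "BYU", "Texas/NC State", "Thu 3/19"⟩),
  ("R1_W_3v14", ⟨"West", "Gonzaga", "Kennesaw State", "Thu 3/19"⟩),
  ("R1_W_7v10", ⟨"West", "Miami FL", "Missouri", "Fri 3/20"⟩),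
  ("R1_W_2v15", ⟨"West", "Purdue", "Queens", "Fri 3/20"⟩),
  ("R1_MW_1v16", ⟨"Midwest", "Michigan", "UMBC/Howard", "Thu 3/19"⟩),
  ("R1_MW_8v9", ⟨"Midwest", "Georgia", "Saint Louis", "Thu 3/19"⟩),
  ("R1_MW_5v12", ⟨"Midwest", "Texas Tech", "Akron", "Fri 3/20"⟩),
  ("R1_MW_4v13", ⟨"Midwest", "Alabama", "Hofstra", "Fri 3/20"⟩),
  ("R1_MW_6v11", ⟨"Midwest", "Tennessee", "SMU/Miami OH", "Fri 3/20"⟩),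
  ("R1_MW_3v14", ⟨"Midwest", "Virginia", "Wright State", "Fri 3/20"⟩),
  ("R1_MW_7v10", ⟨"Midwest", "Kentucky", "Santa Clara", "Fri 3/20"⟩),
  ("R1_MW_2v15", ⟨"Midwest", "Iowa State", "Tennessee State", "Fri 3/20"⟩),
  ("R1_S_1v16", ⟨"South", "Florida", "Lehigh/PV A&M", "Fri 3/20"⟩),
  ("R1_S_8v9", ⟨"South", "Clemson", "Iowa", "Fri 3/20"⟩),
  ("R1_S_5v12", ⟨"South", "Vanderbilt", "McNeese", "Thu 3/19"⟩),
  ("R1_S_4v13", ⟨"South", "Nebraska", "Troy", "Thu 3/19"⟩),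
  ("R1_S_6v11", ⟨"South", "North Carolina", "VCU", "Thu 3/19"⟩),
  ("R1_S_3v14", ⟨"South", "Illinois", "Penn", "Thu 3/19"⟩),
  ("R1_S_7v10", ⟨"South", "Saint Mary's", "Texas A&M", "Thu 3/19"⟩),
  ("R1_S_2v15", ⟨"South", "Houston", "Idaho", "Thu 3/19"⟩)
]

def REGION_DAY_S16 : PySem.Dict String String :=
  PySem.Dict.ofList [("East", "Fri 3/27"), ("West", "Thu 3/26"), ("Midwest", "Fri 3/27"), ("South", "Thu 3/26")]

def REGION_DAY_E8 : PySem.Dict String String :=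
  PySem.Dict.ofList [("East", "Sun 3/29"), ("West", "Sat 3/28"), ("Midwest", "Sun 3/29"), ("South", "Sat 3/28")]

-- get_team_region's loop over FIRST_ROUND.values() (first match wins = Python's early return)
def region_loop : List (String × PVGame) → String → Option String
  | [], _ => none
  | (_, g) :: rest, t =>
    if g.team_a == t then some g.region
    else if g.team_b == t then some g.region
    else region_loop rest t

def get_team_region (team : String) : Option String := region_loop FIRST_ROUND team

-- the r64_day-finding loop (with break) inside get_team_schedule
def r64_loop : List (String × PVGame) → String → Option String
  | [], _ => none
  | (_, g) :: rest, t =>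
    if g.team_a == t || g.team_b == t then some g.day else r64_loop rest t

def get_team_schedule (team : String) : List (String × Option String) :=
  let region := get_team_region team
  let r64_day := r64_loop FIRST_ROUND team
  match region, r64_day with
  | some reg, some rd =>
    if reg == "" || rd == "" then []   -- Python's 'if not region or not r64_day'
    else
      let r32_day := if rd == "Thu 3/19" then "Sat 3/21" else "Sun 3/22"
      [("R64", some rd), ("R32", some r32_day), ("S16", REGION_DAY_S16.get? reg),
       ("E8", REGION_DAY_E8.get? reg), ("FF", some "Sat 4/4"), ("CHAMP", some "Mon 4/6")]
  | _, _ => []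

-- body of 'for rnd, day in ut_sched.items(): if day: used_by_day[key] = used_by_day.get(key, 0) + 1'
def sched_add (d : PySem.Dict String Int) (p : String × Option String) : PySem.Dict String Int :=
  match p.2 with
  | none => d
  | some day =>
    if day == "" then d
    else d.insert (p.1 ++ "|" ++ day) (d.getD (p.1 ++ "|" ++ day) 0 + 1)

def compute_day_conflicts (team : String) (used_teams : List String) : List (String × String) :=
  let team_sched := get_team_schedule team
  if team_sched.isEmpty then []
  else
    let used_by_day := used_teams.foldl (fun d ut => (get_team_schedule ut).foldl sched_add d) PySem.Dict.empty
    let conflicts := team_sched.foldl (fun c p =>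
      match p.2 with
      | none => c   -- 'if not day: continue'
      | some day =>
        if day == "" then c
        else
          let key := p.1 ++ "|" ++ day
          let existing := used_by_day.getD key 0
          if existing ≥ 1 && (p.1 == "E8" || p.1 == "FF") then
            c.insert p.1 ("Already have " ++ PySem.Int.toStr existing ++ " pick(s) on " ++ day ++ " for " ++ p.1)
          else c) PySem.Dict.empty
    conflicts.items

-- ===== PORT B =====
-- the flat team -> Elite-Eight-day table of Source B ("Sun 3/29" for East/Midwest, "Sat 3/28" for West/South)
def TEAM_E8_DAY : PySem.Dict String String := PySem.Dict.ofList [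
  ("Duke", "Sun 3/29"), ("Siena", "Sun 3/29"), ("Ohio State", "Sun 3/29"), ("TCU", "Sun 3/29"),
  ("St. John's", "Sun 3/29"), ("Northern Iowa", "Sun 3/29"), ("Kansas", "Sun 3/29"), ("Cal Baptist", "Sun 3/29"),
  ("Louisville", "Sun 3/29"), ("South Florida", "Sun 3/29"), ("Michigan State", "Sun 3/29"), ("North Dakota State", "Sun 3/29"),
  ("UCLA", "Sun 3/29"), ("UCF", "Sun 3/29"), ("UConn", "Sun 3/29"), ("Furman", "Sun 3/29"),
  ("Arizona", "Sat 3/28"), ("LIU", "Sat 3/28"), ("Villanova", "Sat 3/28"), ("Utah State", "Sat 3/28"),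
  ("Wisconsin", "Sat 3/28"), ("High Point", "Sat 3/28"), ("Arkansas", "Sat 3/28"), ("Hawaii", "Sat 3/28"),
  ("BYU", "Sat 3/28"), ("Texas/NC State", "Sat 3/28"), ("Gonzaga", "Sat 3/28"), ("Kennesaw State", "Sat 3/28"),
  ("Miami FL", "Sat 3/28"), ("Missouri", "Sat 3/28"), ("Purdue", "Sat 3/28"), ("Queens", "Sat 3/28"),
  ("Michigan", "Sun 3/29"), ("UMBC/Howard", "Sun 3/29"), ("Georgia", "Sun 3/29"), ("Saint Louis", "Sun 3/29"),
  ("Texas Tech", "Sun 3/29"), ("Akron", "Sun 3/29"), ("Alabama", "Sun 3/29"), ("Hofstra", "Sun 3/29"),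
  ("Tennessee", "Sun 3/29"), ("SMU/Miami OH", "Sun 3/29"), ("Virginia", "Sun 3/29"), ("Wright State", "Sun 3/29"),
  ("Kentucky", "Sun 3/29"), ("Santa Clara", "Sun 3/29"), ("Iowa State", "Sun 3/29"), ("Tennessee State", "Sun 3/29"),
  ("Florida", "Sat 3/28"), ("Lehigh/PV A&M", "Sat 3/28"), ("Clemson", "Sat 3/28"), ("Iowa", "Sat 3/28"),
  ("Vanderbilt", "Sat 3/28"), ("McNeese", "Sat 3/28"), ("Nebraska", "Sat 3/28"), ("Troy", "Sat 3/28"),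
  ("North Carolina", "Sat 3/28"), ("VCU", "Sat 3/28"), ("Illinois", "Sat 3/28"), ("Penn", "Sat 3/28"),
  ("Saint Mary's", "Sat 3/28"), ("Texas A&M", "Sat 3/28"), ("Houston", "Sat 3/28"), ("Idaho", "Sat 3/28")]

def compute_day_conflicts_alt (team : String) (used_teams : List String) : List (String × String) :=
  match TEAM_E8_DAY.get? team with
  | none => []
  | some my_e8 =>
    -- single pass, two counters: (ff = known used teams, e8 = known used teams sharing my E8 day)
    let counts := used_teams.foldl (fun (p : Int × Int) ut =>
      match TEAM_E8_DAY.get? ut with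
      | none => p
      | some d => (p.1 + 1, if d == my_e8 then p.2 + 1 else p.2)) ((0 : Int), (0 : Int))
    let c1 : PySem.Dict String String :=
      if counts.2 ≠ 0 then
        PySem.Dict.empty.insert "E8" ("Already have " ++ PySem.Int.toStr counts.2 ++ " pick(s) on " ++ my_e8 ++ " for E8")
      else PySem.Dict.empty
    let c2 : PySem.Dict String String :=
      if counts.1 ≠ 0 then
        c1.insert "FF" ("Already have " ++ PySem.Int.toStr counts.1 ++ " pick(s) on Sat 4/4 for FF")
      else c1
    c2.items

-- ===== PRECONDITION & SPEC =====
def Spec_compute_day_conflicts (team : String) (used_teams : List String) (out : List (String × String)) : Prop := out = compute_day_conflicts_alt team used_teams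
instance (team : String) (used_teams : List String) (out : List (String × String)) : Decidable (Spec_compute_day_conflicts team used_teams out) := by unfold Spec_compute_day_conflicts; infer_instance

-- ===== CLAIM (what is proved, stated in full; the proofs are below) =====
def Claim_equal_compute_day_conflicts : Prop := ∀ (team : String) (used_teams : List String), Dom_compute_day_conflicts team used_teams → Spec_compute_day_conflicts team used_teams (compute_day_conflicts team used_teams)

-- ===== LEMMAS AND PROOFS =====

-- one pass over the bracket returning (region, R64 day) of a team, or none — both of A's loops at once
def team_info_loop : List (String × PVGame) → String → Option (String × String)
  | [], _ => none
  | (_, g) :: rest, t =>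
    if t == g.team_a || t == g.team_b then some (g.region, g.day) else team_info_loop rest t

def team_info (team : String) : Option (String × String) := team_info_loop FIRST_ROUND team

-- the nine values team_info can take: none, or one of the 8 (region, R64-day) combinations
def INFOS9 : List (Option (String × String)) :=
  [none,
   some ("East", "Thu 3/19"), some ("East", "Fri 3/20"),
   some ("West", "Thu 3/19"), some ("West", "Fri 3/20"),
   some ("Midwest", "Thu 3/19"), some ("Midwest", "Fri 3/20"),
   some ("South", "Thu 3/19"), some ("South", "Fri 3/20")]

-- the (round, day) pairs a conflict can ever be queried at
def RD : List (String × String) := [("E8", "Sat 3/28"), ("E8", "Sun 3/29"), ("FF", "Sat 4/4")]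

-- B's stored value as a function of a team's region
def valr (reg : String) : String := if reg == "East" || reg == "Midwest" then "Sun 3/29" else "Sat 3/28"

-- the day an info plays a round (proof-side; only E8/FF are queried)
def round_day (info : String × String) (rnd : String) : String :=
  if rnd == "E8" then REGION_DAY_E8.getD info.1 "" else "Sat 4/4"

-- A's schedule as a function of the one-pass lookup
def schedOf : Option (String × String) → List (String × Option String)
  | none => []
  | some (reg, rd) =>
    if reg == "" || rd == "" then []
    else
      [("R64", some rd), ("R32", some (if rd == "Thu 3/19" then "Sat 3/21" else "Sun 3/22")),
       ("S16", REGION_DAY_S16.get? reg), ("E8", REGION_DAY_E8.get? reg),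
       ("FF", some "Sat 4/4"), ("CHAMP", some "Mon 4/6")]

-- how one used team contributes to A's count at (rnd, day)
def contrib (rnd day : String) (j : Option (String × String)) : Int :=
  match j with
  | none => 0
  | some ui => if round_day ui rnd == day then 1 else 0

-- B's two per-team indicators
def cFF (j : Option (String × String)) : Int :=
  match j with
  | none => 0
  | some _ => 1

def cE8 (my : String) (j : Option (String × String)) : Int :=
  match j with
  | none => 0
  | some q => if valr q.1 == my then 1 else 0

lemma loops_eq (L : List (String × PVGame)) (t : String) :
    region_loop L t = (team_info_loop L t).map Prod.fst ∧
      r64_loop L t = (team_info_loop L t).map Prod.snd := by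
  induction L with
  | nil => simp [region_loop, r64_loop, team_info_loop]
  | cons p rest ih =>
    obtain ⟨_, g⟩ := p
    rw [region_loop, r64_loop, team_info_loop]
    rw [show (t == g.team_a) = (g.team_a == t) from Bool.beq_comm, show (t == g.team_b) = (g.team_b == t) from Bool.beq_comm]
    cases ha : g.team_a == t <;> cases hb : g.team_b == t <;>
      simp [ih.1, ih.2]

lemma sched_eq (t : String) : get_team_schedule t = schedOf (team_info t) := by
  obtain ⟨h1, h2⟩ := loops_eq FIRST_ROUND t
  rcases h : team_info_loop FIRST_ROUND t with _ | ⟨reg, rd⟩ <;>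
    simp [get_team_schedule, get_team_region, team_info, h1, h2, h, schedOf]

lemma info_mem (t : String) : team_info t ∈ INFOS9 := by
  have key : ∀ L : List (String × PVGame), (∀ p ∈ L, some (p.2.region, p.2.day) ∈ INFOS9) →
      ∀ t : String, team_info_loop L t ∈ INFOS9 ∨ team_info_loop L t = none := by
    intro L hL t
    induction L with
    | nil => right; rfl
    | cons p rest ih =>
      obtain ⟨_, g⟩ := p
      by_cases h : (t == g.team_a || t == g.team_b) = true
      · left; simpa [team_info_loop, h] using hL (_, g) List.mem_cons_self
      · have := ih (fun q hq => hL q (by simp [hq]))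
        simpa [team_info_loop, h] using this
  have h32 : ∀ p ∈ FIRST_ROUND, some (p.2.region, p.2.day) ∈ INFOS9 := by decide
  rcases key FIRST_ROUND h32 t with h | h
  · exact h
  · rw [team_info, h]; simp [INFOS9]

-- TEAM_E8_DAY is exactly the per-team flattening of FIRST_ROUND with valr of the region as value
lemma flat_eq : TEAM_E8_DAY = PySem.Dict.mk (FIRST_ROUND.flatMap
    (fun p => [(p.2.team_a, valr p.2.region), (p.2.team_b, valr p.2.region)])) := by
  set_option maxRecDepth 4000 in decide

lemma get?_mk_nil {κ ν : Type} [BEq κ] (x : κ) : (PySem.Dict.mk ([] : List (κ × ν))).get? x = none := rfl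

lemma scan_eq (L : List (String × PVGame)) (t : String) :
    (PySem.Dict.mk (L.flatMap
        (fun p => [(p.2.team_a, valr p.2.region), (p.2.team_b, valr p.2.region)]))).get? t
      = (team_info_loop L t).map (fun p => valr p.1) := by
  induction L with
  | nil => simp [team_info_loop, get?_mk_nil]
  | cons p rest ih =>
    obtain ⟨_, g⟩ := p
    rw [List.flatMap_cons, List.cons_append, List.cons_append, List.nil_append,
      PySem.Dict.get?_mk_cons, PySem.Dict.get?_mk_cons, team_info_loop]
    rw [show (t == g.team_a) = (g.team_a == t) from Bool.beq_comm, show (t == g.team_b) = (g.team_b == t) from Bool.beq_comm]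
    cases ha : g.team_a == t <;> cases hb : g.team_b == t <;> simp [ih]

lemma bridge (t : String) : TEAM_E8_DAY.get? t = (team_info t).map (fun p => valr p.1) := by
  rw [flat_eq, team_info]; exact scan_eq FIRST_ROUND t

lemma get_S16_E : REGION_DAY_S16.get? "East" = some "Fri 3/27" := rfl
lemma get_S16_W : REGION_DAY_S16.get? "West" = some "Thu 3/26" := rfl
lemma get_S16_MW : REGION_DAY_S16.get? "Midwest" = some "Fri 3/27" := rfl
lemma get_S16_S : REGION_DAY_S16.get? "South" = some "Thu 3/26" := rfl
lemma get_E8_E : REGION_DAY_E8.get? "East" = some "Sun 3/29" := rfl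
lemma get_E8_W : REGION_DAY_E8.get? "West" = some "Sat 3/28" := rfl
lemma get_E8_MW : REGION_DAY_E8.get? "Midwest" = some "Sun 3/29" := rfl
lemma get_E8_S : REGION_DAY_E8.get? "South" = some "Sat 3/28" := rfl
lemma getD_E8_E : REGION_DAY_E8.getD "East" "" = "Sun 3/29" := rfl
lemma getD_E8_W : REGION_DAY_E8.getD "West" "" = "Sat 3/28" := rfl
lemma getD_E8_MW : REGION_DAY_E8.getD "Midwest" "" = "Sun 3/29" := rfl
lemma getD_E8_S : REGION_DAY_E8.getD "South" "" = "Sat 3/28" := rfl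

lemma getD_insert_ite {κ ν : Type} [BEq κ] [LawfulBEq κ] [DecidableEq κ] (d : PySem.Dict κ ν) (k k' : κ) (v dflt : ν) :
    (d.insert k v).getD k' dflt = if k' = k then v else d.getD k' dflt := by
  by_cases h : k' = k
  · subst h; simp [PySem.Dict.getD_insert_self]
  · simp [h, PySem.Dict.getD_insert_of_ne d v dflt h]

lemma step_contrib (j : Option (String × String)) (hj : j ∈ INFOS9)
    (rd : String × String) (hrd : rd ∈ RD) (d : PySem.Dict String Int) :
    ((schedOf j).foldl sched_add d).getD (rd.1 ++ "|" ++ rd.2) 0 =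
      d.getD (rd.1 ++ "|" ++ rd.2) 0 + contrib rd.1 rd.2 j := by
  fin_cases hj <;> fin_cases hrd <;>
    simp [schedOf, sched_add, contrib, round_day, getD_insert_ite,
      get_S16_E, get_S16_W, get_S16_MW, get_S16_S,
      get_E8_E, get_E8_W, get_E8_MW, get_E8_S,
      getD_E8_E, getD_E8_W, getD_E8_MW, getD_E8_S]

lemma count_fold (rd : String × String) (hrd : rd ∈ RD) :
    ∀ (l : List (Option (String × String))), (∀ j ∈ l, j ∈ INFOS9) →
      ∀ d : PySem.Dict String Int,
        (l.foldl (fun d j => (schedOf j).foldl sched_add d) d).getD (rd.1 ++ "|" ++ rd.2) 0 =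
          d.getD (rd.1 ++ "|" ++ rd.2) 0 + (l.map (contrib rd.1 rd.2)).sum := by
  intro l
  induction l with
  | nil => intro _ d; simp
  | cons j rest ih =>
    intro h d
    simp only [List.foldl_cons, List.map_cons, List.sum_cons]
    rw [ih (fun x hx => h x (by simp [hx])), step_contrib j (h j (by simp)) rd hrd]
    ring

-- B's counter pass computed in closed form
lemma pair_fold (my : String) (l : List (Option (String × String))) :
    ∀ ab : Int × Int,
      (l.foldl (fun (p : Int × Int) j =>
        match j.map (fun q => valr q.1) with
        | none => p
        | some d => (p.1 + 1, if d == my then p.2 + 1 else p.2)) ab) =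
        (ab.1 + (l.map cFF).sum, ab.2 + (l.map (cE8 my)).sum) := by
  induction l with
  | nil => intro ab; simp
  | cons j rest ih =>
    intro ab
    rw [List.foldl_cons, List.map_cons, List.map_cons, List.sum_cons, List.sum_cons, ih]
    rcases j with _ | q
    · simp only [Option.map_none, cFF, cE8, Prod.mk.injEq]
      constructor <;> ring
    · by_cases h : (valr q.1 == my) = true <;>
        simp only [Option.map_some, cFF, cE8, h, if_true, if_false, Bool.false_eq_true,
          Prod.mk.injEq] <;> constructor <;> ring

-- proof-side views of the two ports as functions of the looked-up infos
def ubdOf (l : List (Option (String × String))) : PySem.Dict String Int :=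
  l.foldl (fun d j => (schedOf j).foldl sched_add d) PySem.Dict.empty

def confStep (ubd : PySem.Dict String Int) (c : PySem.Dict String String)
    (p : String × Option String) : PySem.Dict String String :=
  match p.2 with
  | none => c
  | some day =>
    if day == "" then c
    else
      let key := p.1 ++ "|" ++ day
      let existing := ubd.getD key 0
      if existing ≥ 1 && (p.1 == "E8" || p.1 == "FF") then
        c.insert p.1 ("Already have " ++ PySem.Int.toStr existing ++ " pick(s) on " ++ day ++ " for " ++ p.1)
      else c

def A_core (i : Option (String × String)) (l : List (Option (String × String))) : List (String × String) :=
  if (schedOf i).isEmpty then []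
  else ((schedOf i).foldl (confStep (ubdOf l)) PySem.Dict.empty).items

def B_core (i : Option (String × String)) (l : List (Option (String × String))) : List (String × String) :=
  match i.map (fun p => valr p.1) with
  | none => []
  | some my_e8 =>
    let counts := l.foldl (fun (p : Int × Int) j =>
      match j.map (fun q => valr q.1) with
      | none => p
      | some d => (p.1 + 1, if d == my_e8 then p.2 + 1 else p.2)) ((0 : Int), (0 : Int))
    let c1 : PySem.Dict String String :=
      if counts.2 ≠ 0 then
        PySem.Dict.empty.insert "E8" ("Already have " ++ PySem.Int.toStr counts.2 ++ " pick(s) on " ++ my_e8 ++ " for E8")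
      else PySem.Dict.empty
    let c2 : PySem.Dict String String :=
      if counts.1 ≠ 0 then
        c1.insert "FF" ("Already have " ++ PySem.Int.toStr counts.1 ++ " pick(s) on Sat 4/4 for FF")
      else c1
    c2.items

lemma A_eq_core (team : String) (used_teams : List String) :
    compute_day_conflicts team used_teams = A_core (team_info team) (used_teams.map team_info) := by
  unfold compute_day_conflicts A_core ubdOf confStep
  simp only [sched_eq, List.foldl_map]

lemma B_eq_core (team : String) (used_teams : List String) :
    compute_day_conflicts_alt team used_teams = B_core (team_info team) (used_teams.map team_info) := by
  unfold compute_day_conflicts_alt B_core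
  simp only [bridge, List.foldl_map]

lemma ubd_getD (l : List (Option (String × String))) (hl : ∀ j ∈ l, j ∈ INFOS9)
    (rd : String × String) (hrd : rd ∈ RD) :
    (ubdOf l).getD (rd.1 ++ "|" ++ rd.2) 0 = (l.map (contrib rd.1 rd.2)).sum := by
  rw [ubdOf, count_fold rd hrd l hl]
  simp [PySem.Dict.getD, PySem.Dict.get?, PySem.Dict.empty]

-- pointwise agreement of the two counting notions on the reachable infos
lemma cFF_eq (j : Option (String × String)) : cFF j = contrib "FF" "Sat 4/4" j := by
  rcases j with _ | q <;> rfl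

lemma cE8_eq (j : Option (String × String)) (hj : j ∈ INFOS9) (my : String) :
    cE8 my j = contrib "E8" my j := by
  fin_cases hj <;> rfl

lemma cFF_nonneg (l : List (Option (String × String))) : 0 ≤ (l.map cFF).sum := by
  apply List.sum_nonneg; intro x hx
  obtain ⟨j, _, rfl⟩ := List.mem_map.mp hx
  rcases j with _ | q <;> simp [cFF]

lemma cE8_nonneg (my : String) (l : List (Option (String × String))) : 0 ≤ (l.map (cE8 my)).sum := by
  apply List.sum_nonneg; intro x hx
  obtain ⟨j, _, rfl⟩ := List.mem_map.mp hx
  rcases j with _ | q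
  · simp [cE8]
  · simp only [cE8]; split_ifs <;> simp

lemma core_eq (i : Option (String × String)) (hi : i ∈ INFOS9)
    (l : List (Option (String × String))) (hl : ∀ j ∈ l, j ∈ INFOS9) :
    A_core i l = B_core i l := by
  have hE8 : ∀ my : String, (l.map (cE8 my)).sum = (l.map (contrib "E8" my)).sum := by
    intro my
    exact congrArg List.sum (List.map_congr_left (fun j hj => cE8_eq j (hl j hj) my))
  have hFFm : (l.map cFF).sum = (l.map (contrib "FF" "Sat 4/4")).sum :=
    congrArg List.sum (List.map_congr_left (fun j _ => cFF_eq j))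
  have hE8sat : (ubdOf l).getD "E8|Sat 3/28" 0 = (l.map (contrib "E8" "Sat 3/28")).sum := by
    simpa using ubd_getD l hl ("E8", "Sat 3/28") (by simp [RD])
  have hE8sun : (ubdOf l).getD "E8|Sun 3/29" 0 = (l.map (contrib "E8" "Sun 3/29")).sum := by
    simpa using ubd_getD l hl ("E8", "Sun 3/29") (by simp [RD])
  have hFF : (ubdOf l).getD "FF|Sat 4/4" 0 = (l.map (contrib "FF" "Sat 4/4")).sum := by
    simpa using ubd_getD l hl ("FF", "Sat 4/4") (by simp [RD])
  have hn8a : 0 ≤ (l.map (contrib "E8" "Sat 3/28")).sum := (hE8 "Sat 3/28") ▸ cE8_nonneg "Sat 3/28" l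
  have hn8u : 0 ≤ (l.map (contrib "E8" "Sun 3/29")).sum := (hE8 "Sun 3/29") ▸ cE8_nonneg "Sun 3/29" l
  have hnf : 0 ≤ (l.map (contrib "FF" "Sat 4/4")).sum := hFFm ▸ cFF_nonneg l
  have c8a : ((l.map (contrib "E8" "Sat 3/28")).sum ≠ 0) = (1 ≤ (l.map (contrib "E8" "Sat 3/28")).sum) := by
    apply propext; omega
  have c8u : ((l.map (contrib "E8" "Sun 3/29")).sum ≠ 0) = (1 ≤ (l.map (contrib "E8" "Sun 3/29")).sum) := by
    apply propext; omega
  have cf : ((l.map (contrib "FF" "Sat 4/4")).sum ≠ 0) = (1 ≤ (l.map (contrib "FF" "Sat 4/4")).sum) := by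
    apply propext; omega
  simp only [INFOS9, List.mem_cons, List.not_mem_nil, or_false] at hi
  rcases hi with rfl | rfl | rfl | rfl | rfl | rfl | rfl | rfl | rfl
  · simp [A_core, B_core, schedOf]
  all_goals
    simp only [A_core, B_core, schedOf, Option.map_some, pair_fold]
    simp [confStep, valr, hE8, hFFm, hE8sat, hE8sun, hFF, c8a, c8u, cf, String.append_assoc,
      get_E8_E, get_E8_W, get_E8_MW, get_E8_S, get_S16_E, get_S16_W, get_S16_MW, get_S16_S]

lemma main_eq (team : String) (used_teams : List String) :
    compute_day_conflicts team used_teams = compute_day_conflicts_alt team used_teams := by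
  have hl : ∀ j ∈ used_teams.map team_info, j ∈ INFOS9 := by
    intro j hj
    obtain ⟨t, _, rfl⟩ := List.mem_map.mp hj
    exact info_mem t
  rw [A_eq_core, B_eq_core, core_eq (team_info team) (info_mem team) _ hl]

-- ===== VERDICT (by name: the statement is the Claim_ definition above) =====
theorem compute_day_conflicts_spec : Claim_equal_compute_day_conflicts := by
  intro team used_teams _
  exact main_eq team used_teams
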